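-- pv_equiv track=rewrite | github.com/Submission-BEAVER/Beaver | Demo.py | _kmp_find_last
-- ===== SOURCE A (Python) =====
-- from typing import Any, Dict, List
--
-- def _kmp_build_lps(pattern: List[int]) -> List[int]:
--     lps = [0] * len(pattern)
--     j = 0
--     for i in range(1, len(pattern)):
--         while j > 0 and pattern[i] != pattern[j]:
--             j = lps[j - 1]
--         if pattern[i] == pattern[j]:
--             j += 1
--             lps[i] = j
--     return lps
--
-- def _kmp_find_last(text: List[int], pattern: List[int]) -> int:
--     """Return last start index of pattern in text, or -1."""
--     if not pattern:
--         return 0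
--     rt = list(reversed(text))
--     rp = list(reversed(pattern))
--     lps = _kmp_build_lps(rp)
--     j = 0
--     ridx = -1
--     for i in range(len(rt)):
--         while j > 0 and rt[i] != rp[j]:
--             j = lps[j - 1]
--         if rt[i] == rp[j]:
--             j += 1
--             if j == len(rp):
--                 ridx = i - len(rp) + 1
--                 break
--     if ridx < 0:
--         return -1
--     return len(text) - (ridx + len(pattern))
-- ===== SOURCE B (Python) =====
-- def _kmp_find_last(text, pattern):
--     """Return last start index of pattern in text, or -1."""
--     if not pattern:
--         return 0
--     m = len(pattern)
--     i = len(text) - m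
--     while i >= 0:
--         if text[i:i + m] == pattern:
--             return i
--         i -= 1
--     return -1
-- ===== Notes on version B (the rewrite author's own statement) =====
-- stated objective: simpler
-- what changed: Replaces the reverse-both-lists-plus-KMP machinery (LPS table, failure-link inner loop) with a direct naive scan of candidate start indices from right to left, returning the first window equal to the pattern; no reversal and no table.
import Mathlib
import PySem

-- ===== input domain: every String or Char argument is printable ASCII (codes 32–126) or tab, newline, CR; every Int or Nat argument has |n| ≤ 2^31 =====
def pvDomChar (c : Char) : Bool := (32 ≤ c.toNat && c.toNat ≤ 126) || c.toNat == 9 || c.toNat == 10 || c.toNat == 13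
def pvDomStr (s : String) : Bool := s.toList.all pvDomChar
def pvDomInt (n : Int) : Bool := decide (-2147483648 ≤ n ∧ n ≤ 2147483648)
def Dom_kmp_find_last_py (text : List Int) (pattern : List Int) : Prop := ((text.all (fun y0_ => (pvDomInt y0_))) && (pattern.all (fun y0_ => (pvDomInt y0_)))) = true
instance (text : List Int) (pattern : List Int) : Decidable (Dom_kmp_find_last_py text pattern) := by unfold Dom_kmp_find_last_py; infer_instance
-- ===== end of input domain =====

-- B replaces the reversed-KMP search by a plain right-to-left naive window scan (simpler, no LPS table).


-- ===== PORT A =====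
-- the `while j > 0 and x != pattern[j]: j = lps[j-1]` loop; the `j2 < j` test is a
-- totality guard only (the lps table built below always satisfies lps[j-1] < j)
def pvAdjust (rp : List Int) (lps : List Nat) (c : Int) (j : Nat) : Nat :=
  if 0 < j ∧ c ≠ rp.getD j 0 then
    let j2 := lps.getD (j - 1) 0
    if _h : j2 < j then pvAdjust rp lps c j2 else j2
  else j
termination_by j

-- one iteration of the `for i in range(1, len(pattern))` loop of _kmp_build_lps
def pvBuildStep (rp : List Int) (st : List Nat × Nat) (i : Nat) : List Nat × Nat :=
  let j := pvAdjust rp st.1 (rp.getD i 0) st.2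
  if rp.getD i 0 = rp.getD j 0 then (st.1.set i (j + 1), j + 1) else (st.1, j)

-- _kmp_build_lps
def pvBuildLps (rp : List Int) : List Nat :=
  (List.foldl (pvBuildStep rp) (List.replicate rp.length 0, 0) (List.range' 1 (rp.length - 1))).1

-- the `for i in range(len(rt))` search loop with its break; returns ridx (or -1)
def pvSearch (rt rp : List Int) (lps : List Nat) (i j : Nat) : Int :=
  if _h : i < rt.length then
    let j' := pvAdjust rp lps (rt.getD i 0) j
    if rt.getD i 0 = rp.getD j' 0 then
      if j' + 1 = rp.length then (i : Int) - rp.length + 1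
      else pvSearch rt rp lps (i + 1) (j' + 1)
    else pvSearch rt rp lps (i + 1) j'
  else -1
termination_by rt.length - i

def kmp_find_last_py (text : List Int) (pattern : List Int) : Int :=
  if pattern = [] then 0
  else
    let rt := text.reverse
    let rp := pattern.reverse
    let lps := pvBuildLps rp
    let ridx := pvSearch rt rp lps 0 0
    if ridx < 0 then -1 else (text.length : Int) - (ridx + pattern.length)

-- ===== PORT B =====
-- the descending `while i >= 0` loop of Source B
def pvDescend (text pattern : List Int) (i : Nat) : Int :=
  if (text.drop i).take pattern.length = pattern then (i : Int)
  else if i = 0 then -1 else pvDescend text pattern (i - 1)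
termination_by i

def kmp_find_last_py_alt (text : List Int) (pattern : List Int) : Int :=
  if pattern = [] then 0
  else if text.length < pattern.length then -1
  else pvDescend text pattern (text.length - pattern.length)

-- ===== PRECONDITION & SPEC =====
def Spec_kmp_find_last_py (text : List Int) (pattern : List Int) (out : Int) : Prop := out = kmp_find_last_py_alt text pattern
instance (text : List Int) (pattern : List Int) (out : Int) : Decidable (Spec_kmp_find_last_py text pattern out) := by unfold Spec_kmp_find_last_py; infer_instance

-- ===== CLAIM (what is proved, stated in full; the proofs are below) =====
def Claim_equal_kmp_find_last_py : Prop := ∀ (text : List Int) (pattern : List Int), Dom_kmp_find_last_py text pattern → Spec_kmp_find_last_py text pattern (kmp_find_last_py text pattern)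

-- ===== LEMMAS AND PROOFS =====

def IsMB (s : List Int) (b : Nat) : Prop :=
  b < s.length ∧ s.take b <:+ s ∧ ∀ k, k < s.length → s.take k <:+ s → k ≤ b

theorem pv_suffix_of_suffix (xs ys w : List Int) (h1 : xs <:+ w) (h2 : ys <:+ w)
    (h : xs.length ≤ ys.length) : xs <:+ ys := by
  rw [← List.reverse_prefix] at h1 h2 ⊢
  exact List.prefix_of_prefix_length_le h1 h2 (by simpa)

theorem pv_concat_suffix (xs w : List Int) (a c : Int) :
    (xs ++ [a]) <:+ (w ++ [c]) ↔ (xs <:+ w ∧ a = c) := by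
  rw [← List.reverse_prefix]
  simp [List.cons_prefix_cons, and_comm]

theorem pv_take_eq_concat (rp : List Int) (k : Nat) (hk : 0 < k) (hkm : k ≤ rp.length) :
    rp.take k = rp.take (k-1) ++ [rp.getD (k-1) 0] := by
  obtain ⟨k', rfl⟩ : ∃ k', k = k' + 1 := ⟨k - 1, by omega⟩
  have hlt : k' < rp.length := by omega
  simp only [Nat.add_sub_cancel]
  rw [List.take_add_one, List.getD_eq_getElem _ _ hlt, List.getElem?_eq_getElem hlt]
  rfl

theorem pv_ext (rp w : List Int) (c : Int) (k : Nat) (hk : 0 < k) (hkm : k ≤ rp.length) :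
    (rp.take k <:+ w ++ [c]) ↔ ((rp.take (k - 1) <:+ w) ∧ rp.getD (k - 1) 0 = c) := by
  rw [pv_take_eq_concat rp k hk hkm, pv_concat_suffix]

theorem pv_getD_set_self (l : List Nat) (i v : Nat) (h : i < l.length) :
    (l.set i v).getD i 0 = v := by
  simp [List.getD, h]

theorem pv_getD_set_ne (l : List Nat) (i e v : Nat) (h : e ≠ i) :
    (l.set i v).getD e 0 = l.getD e 0 := by
  simp [List.getD, List.getElem?_set_ne (Ne.symm h)]

theorem pv_adjust_spec (rp : List Int) (lps : List Nat) (c : Int) (w : List Int) (bound : Nat) :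
    ∀ j, j < rp.length →
    (∀ e, e < j → IsMB (rp.take (e + 1)) (lps.getD e 0)) →
    rp.take j <:+ w →
    (∀ k, k ≤ rp.length → k - 1 < bound → 0 < k → rp.take (k - 1) <:+ w →
      rp.getD (k - 1) 0 = c → k - 1 ≤ j) →
    pvAdjust rp lps c j ≤ j ∧ rp.take (pvAdjust rp lps c j) <:+ w ∧
    (0 < pvAdjust rp lps c j → c = rp.getD (pvAdjust rp lps c j) 0) ∧
    (∀ k, k ≤ rp.length → k - 1 < bound → 0 < k → rp.take (k - 1) <:+ w → rp.getD (k - 1) 0 = c →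
      c = rp.getD (pvAdjust rp lps c j) 0 ∧ k ≤ pvAdjust rp lps c j + 1) := by
  intro j
  induction j using Nat.strong_induction_on with
  | _ j IH =>
    intro hj hg hb hext
    by_cases hcond : 0 < j ∧ c ≠ rp.getD j 0
    · obtain ⟨hj0, hne⟩ := hcond
      have hmb : IsMB (rp.take j) (lps.getD (j - 1) 0) := by
        have := hg (j - 1) (by omega)
        simpa [Nat.sub_add_cancel hj0] using this
      set j2 := lps.getD (j - 1) 0 with hj2def
      have hlenj : (rp.take j).length = j := by simp; omega
      have hlt : j2 < j := by have := hmb.1; omega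
      have heq : pvAdjust rp lps c j = pvAdjust rp lps c j2 := by
        conv_lhs => rw [pvAdjust]
        rw [if_pos ⟨hj0, hne⟩]
        show (if _h : j2 < j then pvAdjust rp lps c j2 else j2) = pvAdjust rp lps c j2
        rw [dif_pos hlt]
      have hb2 : rp.take j2 <:+ w := by
        have h1 : (rp.take j).take j2 <:+ rp.take j := hmb.2.1
        rw [List.take_take, min_eq_left (le_of_lt hlt)] at h1
        exact h1.trans hb
      have hext2 : ∀ k, k ≤ rp.length → k - 1 < bound → 0 < k → rp.take (k - 1) <:+ w →
          rp.getD (k - 1) 0 = c → k - 1 ≤ j2 := by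
        intro k hkm hkb hk0 hkw hkc
        have hkj : k - 1 ≤ j := hext k hkm hkb hk0 hkw hkc
        have hklt : k - 1 < j := by
          rcases Nat.lt_or_ge (k-1) j with h | h
          · exact h
          · exfalso; apply hne; rw [← hkc]; congr 1; omega
        have hsub : rp.take (k - 1) <:+ rp.take j := by
          apply pv_suffix_of_suffix _ _ w hkw hb
          simp; omega
        exact hmb.2.2 (k - 1) (by omega) (by
          rwa [List.take_take, min_eq_left (le_of_lt hklt)])
      have := IH j2 hlt (by omega) (fun e he => hg e (by omega)) hb2 hext2
      rw [heq]
      exact ⟨le_trans this.1 (by omega), this.2.1, this.2.2.1, this.2.2.2⟩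
    · have heq : pvAdjust rp lps c j = j := by
        conv_lhs => rw [pvAdjust]
        rw [if_neg hcond]
      have hcond' : 0 < j → c = rp.getD j 0 := by
        intro h0; by_contra hne; exact hcond ⟨h0, hne⟩
      rw [heq]
      refine ⟨le_refl _, hb, hcond', ?_⟩
      intro k hkm hkb hk0 hkw hkc
      have hkj : k - 1 ≤ j := hext k hkm hkb hk0 hkw hkc
      refine ⟨?_, by omega⟩
      by_cases hj0 : 0 < j
      · exact hcond' hj0
      · have : j = 0 := by omega
        subst this
        rw [← hkc]; congr 1; omega

theorem pv_step_spec (rp : List Int) (lps : List Nat) (c : Int) (w : List Int) (bound : Nat)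
    (j : Nat) (hj : j < rp.length)
    (hg : ∀ e, e < j → IsMB (rp.take (e + 1)) (lps.getD e 0))
    (hb : rp.take j <:+ w)
    (hmax : ∀ k, k ≤ rp.length → k < bound → rp.take k <:+ w → k ≤ j) :
    (if c = rp.getD (pvAdjust rp lps c j) 0 then pvAdjust rp lps c j + 1 else pvAdjust rp lps c j) ≤ j + 1 ∧
    rp.take (if c = rp.getD (pvAdjust rp lps c j) 0 then pvAdjust rp lps c j + 1 else pvAdjust rp lps c j) <:+ w ++ [c] ∧
    (∀ k, k ≤ rp.length → k < bound + 1 → rp.take k <:+ w ++ [c] →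
      k ≤ (if c = rp.getD (pvAdjust rp lps c j) 0 then pvAdjust rp lps c j + 1 else pvAdjust rp lps c j)) := by
  have hext : ∀ k, k ≤ rp.length → k - 1 < bound → 0 < k → rp.take (k - 1) <:+ w →
      rp.getD (k - 1) 0 = c → k - 1 ≤ j := by
    intro k hkm hkb hk0 hkw hkc
    exact hmax (k - 1) (by omega) (by omega) hkw
  obtain ⟨ha1, ha2, ha3, ha4⟩ := pv_adjust_spec rp lps c w bound j hj hg hb hext
  set j' := pvAdjust rp lps c j with hj'def
  have hj'j : j' ≤ j := ha1
  have hj'm : j' + 1 ≤ rp.length := by omega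
  by_cases hm : c = rp.getD j' 0
  · rw [if_pos hm]
    refine ⟨by omega, ?_, ?_⟩
    · rw [pv_ext rp w c (j' + 1) (by omega) hj'm]
      simpa using ⟨ha2, hm.symm⟩
    · intro k hkm hkb hkw
      rcases Nat.eq_zero_or_pos k with rfl | hk0
      · omega
      · rw [pv_ext rp w c k hk0 hkm] at hkw
        exact (ha4 k hkm (by omega) hk0 hkw.1 hkw.2).2
  · rw [if_neg hm]
    have hz : j' = 0 := by
      by_contra h
      exact hm (ha3 (by omega))
    refine ⟨by omega, by simp [hz], ?_⟩
    intro k hkm hkb hkw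
    rcases Nat.eq_zero_or_pos k with rfl | hk0
    · omega
    · rw [pv_ext rp w c k hk0 hkm] at hkw
      exact absurd (ha4 k hkm (by omega) hk0 hkw.1 hkw.2).1 hm

theorem pv_build_loop (rp : List Int) (hrp : rp ≠ []) :
    ∀ kk, kk ≤ rp.length - 1 →
    ((List.foldl (pvBuildStep rp) (List.replicate rp.length 0, 0) (List.range' 1 kk)).1.length = rp.length ∧
     (∀ e, e ≤ kk → IsMB (rp.take (e + 1))
        ((List.foldl (pvBuildStep rp) (List.replicate rp.length 0, 0) (List.range' 1 kk)).1.getD e 0)) ∧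
     (List.foldl (pvBuildStep rp) (List.replicate rp.length 0, 0) (List.range' 1 kk)).2 =
        (List.foldl (pvBuildStep rp) (List.replicate rp.length 0, 0) (List.range' 1 kk)).1.getD kk 0 ∧
     (∀ e, kk < e →
        (List.foldl (pvBuildStep rp) (List.replicate rp.length 0, 0) (List.range' 1 kk)).1.getD e 0 = 0)) := by
  have hm : 0 < rp.length := List.length_pos_iff.mpr hrp
  intro kk
  induction kk with
  | zero =>
    intro _
    refine ⟨by simp, ?_, ?_, ?_⟩
    · intro e he
      interval_cases e
      refine ⟨?_, ?_, ?_⟩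
      · simp [List.getD]; omega
      · simp [List.getD]
      · intro k hk _; simp [List.getD]
        simp at hk; omega
    · simp [List.getD]
    · intro e he; simp [List.getD]
  | succ kk ih =>
    intro hkk
    have hprev := ih (by omega)
    obtain ⟨hlen, hmb, hj, hzero⟩ := hprev
    set st := List.foldl (pvBuildStep rp) (List.replicate rp.length 0, 0) (List.range' 1 kk) with hstdef
    have hunf : List.range' 1 (kk + 1) = List.range' 1 kk ++ [1 + kk] :=
      List.range'_1_concat
    have hfold : List.foldl (pvBuildStep rp) (List.replicate rp.length 0, 0) (List.range' 1 (kk+1)) =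
        pvBuildStep rp st (kk + 1) := by
      rw [hunf, List.foldl_append]
      simp [hstdef, Nat.add_comm]
    rw [hfold]
    set i := kk + 1 with hidef
    have hi : i < rp.length := by omega
    have hmbj : IsMB (rp.take i) st.2 := by rw [hj, hidef]; exact hmb kk (le_refl _)
    have hleni : (rp.take i).length = i := by simp; omega
    have hjlt : st.2 < i := by have := hmbj.1; omega
    have hjm : st.2 < rp.length := by omega
    have hg2 : ∀ e, e < st.2 → IsMB (rp.take (e + 1)) (st.1.getD e 0) := by
      intro e he; exact hmb e (by omega)
    have hb2 : rp.take st.2 <:+ rp.take i := by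
      have h1 := hmbj.2.1
      rwa [List.take_take, min_eq_left (le_of_lt hjlt)] at h1
    have hmax2 : ∀ k, k ≤ rp.length → k < i → rp.take k <:+ rp.take i → k ≤ st.2 := by
      intro k hkm hki hkw
      exact hmbj.2.2 k (by omega) (by rwa [List.take_take, min_eq_left (le_of_lt hki)])
    have hstep := pv_step_spec rp st.1 (rp.getD i 0) (rp.take i) i st.2 hjm hg2 hb2 hmax2
    obtain ⟨hs1, hs2, hs3⟩ := hstep
    set c := rp.getD i 0 with hcdef
    set j' := pvAdjust rp st.1 c st.2 with hj'def
    set jn := if c = rp.getD j' 0 then j' + 1 else j' with hjndef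
    have hcat : rp.take i ++ [c] = rp.take (i + 1) := by
      rw [hcdef]
      have h := pv_take_eq_concat rp (i+1) (by omega) (by omega)
      simp only [Nat.add_sub_cancel] at h
      exact h.symm
    rw [hcat] at hs2 hs3
    have hleni1 : (rp.take (i+1)).length = i + 1 := by simp; omega
    have hjni : jn ≤ i := by omega
    have hmbn : IsMB (rp.take (i + 1)) jn := by
      refine ⟨by omega, ?_, ?_⟩
      · rwa [List.take_take, min_eq_left (by omega)]
      · intro k hk hkw
        rw [List.take_take, min_eq_left (by omega)] at hkw
        exact hs3 k (by omega) (by omega) hkw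
    -- compute the new state
    have hst' : (pvBuildStep rp st i).1.length = rp.length ∧
        (pvBuildStep rp st i).2 = jn ∧
        (pvBuildStep rp st i).1.getD i 0 = jn ∧
        (∀ e, e ≠ i → (pvBuildStep rp st i).1.getD e 0 = st.1.getD e 0) := by
      unfold pvBuildStep
      rw [← hcdef, ← hj'def]
      by_cases hmatch : c = rp.getD j' 0
      · rw [if_pos hmatch]
        refine ⟨by simp [hlen], by rw [hjndef, if_pos hmatch], ?_, ?_⟩
        · rw [hjndef, if_pos hmatch]
          exact pv_getD_set_self st.1 i (j' + 1) (by omega)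
        · intro e he
          exact pv_getD_set_ne st.1 i e (j' + 1) he
      · rw [if_neg hmatch]
        have hz : j' = 0 := by
          by_contra h
          obtain ⟨_, _, ha3, _⟩ := pv_adjust_spec rp st.1 c (rp.take i) i st.2 hjm hg2 hb2
            (fun k hkm hkb hk0 hkw hkc => hmax2 (k-1) (by omega) (by omega) hkw)
          exact hmatch (ha3 (by omega))
        refine ⟨hlen, by rw [hjndef, if_neg hmatch], ?_, fun e _ => rfl⟩
        rw [hjndef, if_neg hmatch, hz]
        exact hzero i (by omega)
    obtain ⟨hl', hs2', hgi', hne'⟩ := hst'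
    refine ⟨hl', ?_, ?_, ?_⟩
    · intro e he
      rcases Nat.lt_or_ge e i with hlt2 | hge
      · rw [hne' e (by omega)]
        exact hmb e (by omega)
      · have he2 : e = i := by omega
        subst he2
        rw [hgi']
        exact hmbn
    · rw [hs2', hgi']
    · intro e he
      rw [hne' e (by omega)]
      exact hzero e (by omega)

theorem pv_build_spec (rp : List Int) :
    (pvBuildLps rp).length = rp.length ∧
    ∀ e, e < rp.length → IsMB (rp.take (e + 1)) ((pvBuildLps rp).getD e 0) := by
  by_cases hrp : rp = []
  · subst hrp
    constructor
    · simp [pvBuildLps]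
    · intro e he; simp at he
  · have hm : 0 < rp.length := List.length_pos_iff.mpr hrp
    have := pv_build_loop rp hrp (rp.length - 1) (le_refl _)
    exact ⟨this.1, fun e he => this.2.1 e (by omega)⟩

theorem pv_search_spec (rt rp : List Int) (lps : List Nat)
    (hg : ∀ e, e < rp.length → IsMB (rp.take (e + 1)) (lps.getD e 0)) :
    ∀ fuel i j, fuel = rt.length - i → j < rp.length →
    rp.take j <:+ rt.take i →
    (∀ k, k ≤ rp.length → rp.take k <:+ rt.take i → k ≤ j) →
    ((pvSearch rt rp lps i j = -1 ∧ ∀ e, i ≤ e → e < rt.length → ¬ (rp <:+ rt.take (e + 1)))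
     ∨ (∃ e, i ≤ e ∧ e < rt.length ∧ rp <:+ rt.take (e + 1) ∧
        (∀ e', i ≤ e' → e' < e → ¬ (rp <:+ rt.take (e' + 1))) ∧
        pvSearch rt rp lps i j = (e : Int) - rp.length + 1)) := by
  intro fuel
  induction fuel with
  | zero =>
    intro i j hfuel hj hb hmax
    have hge : rt.length ≤ i := by omega
    have heq : pvSearch rt rp lps i j = -1 := by
      conv_lhs => rw [pvSearch]
      rw [dif_neg (by omega)]
    exact Or.inl ⟨heq, fun e he1 he2 => absurd (lt_of_le_of_lt he1 he2) (by omega)⟩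
  | succ fuel ih =>
    intro i j hfuel hj hb hmax
    by_cases hi : i < rt.length
    · set c := rt.getD i 0 with hcdef
      have hg2 : ∀ e, e < j → IsMB (rp.take (e + 1)) (lps.getD e 0) :=
        fun e he => hg e (by omega)
      have hmax2 : ∀ k, k ≤ rp.length → k - 1 < rp.length + 1 → 0 < k →
          rp.take (k - 1) <:+ rt.take i → rp.getD (k - 1) 0 = c → k - 1 ≤ j :=
        fun k hkm _ _ hkw _ => hmax (k - 1) (by omega) hkw
      obtain ⟨ha1, _, _, _⟩ := pv_adjust_spec rp lps c (rt.take i) (rp.length + 1) j hj hg2 hb hmax2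
      obtain ⟨hs1, hs2, hs3⟩ := pv_step_spec rp lps c (rt.take i) (rp.length + 1) j hj hg2 hb
        (fun k hk _ hw => hmax k hk hw)
      set j' := pvAdjust rp lps c j with hj'def
      have hcat : rt.take i ++ [c] = rt.take (i + 1) := by
        rw [hcdef]
        have h := pv_take_eq_concat rt (i + 1) (by omega) (by omega)
        simp only [Nat.add_sub_cancel] at h
        exact h.symm
      rw [hcat] at hs2 hs3
      have heq : pvSearch rt rp lps i j =
          (if c = rp.getD j' 0 then
            (if j' + 1 = rp.length then (i : Int) - rp.length + 1
             else pvSearch rt rp lps (i + 1) (j' + 1))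
           else pvSearch rt rp lps (i + 1) j') := by
        conv_lhs => rw [pvSearch]
        rw [dif_pos hi]
      by_cases hmm : c = rp.getD j' 0
      · rw [if_pos hmm] at heq hs1 hs2 hs3
        by_cases hfull : j' + 1 = rp.length
        · rw [if_pos hfull] at heq
          refine Or.inr ⟨i, le_refl _, hi, ?_, fun e' h1 h2 => absurd (lt_of_le_of_lt h1 h2) (by omega), ?_⟩
          · have := hs2
            rw [hfull, List.take_length] at this
            exact this
          · rw [heq]
        · rw [if_neg hfull] at heq
          have hjn : j' + 1 < rp.length := by omega
          have hnoM : ¬ (rp <:+ rt.take (i + 1)) := by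
            intro hM
            have := hs3 rp.length (le_refl _) (by omega) (by rwa [List.take_length])
            omega
          have := ih (i + 1) (j' + 1) (by omega) hjn hs2 (fun k hk hw => hs3 k hk (by omega) hw)
          rcases this with ⟨hv, hnone⟩ | ⟨e, he1, he2, hMe, hmin, hv⟩
          · refine Or.inl ⟨by rw [heq]; exact hv, ?_⟩
            intro e he1 he2
            rcases Nat.eq_or_lt_of_le he1 with rfl | hlt
            · exact hnoM
            · exact hnone e hlt he2
          · refine Or.inr ⟨e, by omega, he2, hMe, ?_, by rw [heq]; exact hv⟩
            intro e' h1 h2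
            rcases Nat.eq_or_lt_of_le h1 with rfl | hlt
            · exact hnoM
            · exact hmin e' hlt h2
      · rw [if_neg hmm] at heq hs1 hs2 hs3
        have hjn : j' < rp.length := by omega
        have hnoM : ¬ (rp <:+ rt.take (i + 1)) := by
          intro hM
          have := hs3 rp.length (le_refl _) (by omega) (by rwa [List.take_length])
          omega
        have := ih (i + 1) j' (by omega) hjn hs2 (fun k hk hw => hs3 k hk (by omega) hw)
        rcases this with ⟨hv, hnone⟩ | ⟨e, he1, he2, hMe, hmin, hv⟩
        · refine Or.inl ⟨by rw [heq]; exact hv, ?_⟩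
          intro e he1 he2
          rcases Nat.eq_or_lt_of_le he1 with rfl | hlt
          · exact hnoM
          · exact hnone e hlt he2
        · refine Or.inr ⟨e, by omega, he2, hMe, ?_, by rw [heq]; exact hv⟩
          intro e' h1 h2
          rcases Nat.eq_or_lt_of_le h1 with rfl | hlt
          · exact hnoM
          · exact hmin e' hlt h2
    · have heq : pvSearch rt rp lps i j = -1 := by
        conv_lhs => rw [pvSearch]
        rw [dif_neg hi]
      exact Or.inl ⟨heq, fun e he1 he2 => absurd (lt_of_le_of_lt he1 he2) (by omega)⟩

theorem pv_descend_spec (text pattern : List Int) :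
    ∀ i,
    ((pvDescend text pattern i = -1 ∧ ∀ s, s ≤ i → (text.drop s).take pattern.length ≠ pattern)
     ∨ (∃ s, s ≤ i ∧ (text.drop s).take pattern.length = pattern ∧
        (∀ s', s < s' → s' ≤ i → (text.drop s').take pattern.length ≠ pattern) ∧
        pvDescend text pattern i = (s : Int))) := by
  intro i
  induction i with
  | zero =>
    rw [pvDescend]
    by_cases h : (text.drop 0).take pattern.length = pattern
    · rw [if_pos h]
      exact Or.inr ⟨0, le_refl _, h, fun s' h1 h2 => absurd (lt_of_lt_of_le h1 h2) (by omega), rfl⟩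
    · rw [if_neg h, if_pos rfl]
      refine Or.inl ⟨rfl, ?_⟩
      intro s hs
      have : s = 0 := by omega
      subst this
      exact h
  | succ k ih =>
    rw [pvDescend]
    by_cases h : (text.drop (k + 1)).take pattern.length = pattern
    · rw [if_pos h]
      exact Or.inr ⟨k + 1, le_refl _, h, fun s' h1 h2 => absurd (lt_of_lt_of_le h1 h2) (by omega), rfl⟩
    · rw [if_neg h, if_neg (by omega : ¬ (k + 1 = 0))]
      simp only [Nat.add_sub_cancel]
      rcases ih with ⟨hv, hnone⟩ | ⟨s, hs1, hs2, hs3, hv⟩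
      · refine Or.inl ⟨hv, ?_⟩
        intro s hs
        rcases Nat.eq_or_lt_of_le hs with rfl | hlt
        · exact h
        · exact hnone s (by omega)
      · refine Or.inr ⟨s, by omega, hs2, ?_, hv⟩
        intro s' h1 h2
        rcases Nat.eq_or_lt_of_le h2 with rfl | hlt
        · exact h
        · exact hs3 s' h1 (by omega)

theorem pv_bridge (text pattern : List Int) (e : Nat) (he : e < text.length)
    (_hm : pattern.length ≤ e + 1) :
    (pattern.reverse <:+ text.reverse.take (e + 1)) ↔
    (text.drop (text.length - 1 - e)).take pattern.length = pattern := by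
  have h1 : text.reverse.take (e + 1) = (text.drop (text.length - (e + 1))).reverse :=
    List.take_reverse
  have h2 : text.length - (e + 1) = text.length - 1 - e := by omega
  rw [h1, h2, List.reverse_suffix]
  constructor
  · intro h
    have h3 := List.prefix_iff_eq_take.mp h
    exact h3.symm
  · intro h
    rw [← h]
    exact List.take_prefix _ _

-- ===== VERDICT (by name: the statement is the Claim_ definition above) =====
theorem kmp_find_last_py_spec : Claim_equal_kmp_find_last_py := by
  unfold Claim_equal_kmp_find_last_py
  intro text pattern _dom
  unfold Spec_kmp_find_last_py kmp_find_last_py kmp_find_last_py_alt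
  by_cases hp : pattern = []
  · rw [if_pos hp, if_pos hp]
  · rw [if_neg hp, if_neg hp]
    simp only []
    set n := text.length with hndef
    set m := pattern.length with hmdef
    set rt := text.reverse with hrtdef
    set rp := pattern.reverse with hrpdef
    set lps := pvBuildLps rp with hlpsdef
    have hm0 : 0 < m := List.length_pos_iff.mpr hp
    have hrpl : rp.length = m := by rw [hrpdef, List.length_reverse]
    have hrtl : rt.length = n := by rw [hrtdef, List.length_reverse]
    have hrpne : rp ≠ [] := by
      rw [hrpdef]
      simpa using hp
    have hg : ∀ e, e < rp.length → IsMB (rp.take (e + 1)) (lps.getD e 0) :=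
      (pv_build_spec rp).2
    have hb0 : rp.take 0 <:+ rt.take 0 := by simp
    have hmax0 : ∀ k, k ≤ rp.length → rp.take k <:+ rt.take 0 → k ≤ 0 := by
      intro k hk hw
      simp only [List.take_zero] at hw
      have := List.suffix_nil.mp hw
      rcases List.take_eq_nil_iff.mp this with h | h
      · omega
      · exact absurd h hrpne
    have hsearch := pv_search_spec rt rp lps hg rt.length 0 0 (by omega) (by omega) hb0 hmax0
    rcases hsearch with ⟨hv, hnone⟩ | ⟨e, _, hen, hMe, hmin, hv⟩
    · -- no occurrence: both sides -1
      rw [hv, if_pos (by norm_num)]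
      by_cases hnm : n < m
      · rw [if_pos hnm]
      · rw [if_neg hnm]
        rcases pv_descend_spec text pattern (n - m) with ⟨hbv, _⟩ | ⟨s, hs1, hs2, _, _⟩
        · rw [hbv]
        · exfalso
          have he2 : n - 1 - s < n := by omega
          have hm2 : m ≤ (n - 1 - s) + 1 := by omega
          have hM := (pv_bridge text pattern (n - 1 - s) he2 hm2).mpr
            (by rw [(by omega : text.length - 1 - (n - 1 - s) = s)]; exact hs2)
          exact hnone (n - 1 - s) (by omega) (by omega) hM
    · -- occurrence found
      have hml : m ≤ e + 1 := by
        have := hMe.length_le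
        rw [hrpl] at this
        simp at this
        omega
      have hridx : ¬ ((e : Int) - rp.length + 1 < 0) := by
        rw [hrpl]
        omega
      rw [hv, if_neg hridx]
      have hnm : ¬ (n < m) := by omega
      rw [if_neg hnm]
      have hocc0 : (text.drop (n - 1 - e)).take m = pattern :=
        (pv_bridge text pattern e (by omega) hml).mp hMe
      rcases pv_descend_spec text pattern (n - m) with ⟨_, hno⟩ | ⟨s, hs1, hs2, hsmax, hbv⟩
      · exact absurd hocc0 (hno (n - 1 - e) (by omega))
      · rw [hbv]
        have hsle : s ≤ n - 1 - e := by
          have he2 : n - 1 - s < n := by omega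
          have hm2 : m ≤ (n - 1 - s) + 1 := by omega
          have hM2 := (pv_bridge text pattern (n - 1 - s) he2 hm2).mpr
            (by rw [(by omega : text.length - 1 - (n - 1 - s) = s)]; exact hs2)
          by_contra hcon
          have : n - 1 - s < e := by omega
          exact hmin (n - 1 - s) (by omega) this hM2
        have hsge : n - 1 - e ≤ s := by
          by_contra hcon
          exact hsmax (n - 1 - e) (by omega) (by omega) hocc0
        have hse : s = n - 1 - e := by omega
        rw [hrpl, hse]
        omega
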